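-- pv_equiv track=rewrite | github.com/alkazarassociates/EPADonationMatch | donation_data.py | PartialKeyFind
-- ===== SOURCE A (Python) =====
-- def PartialKeyFind(values, partial_key):
--     """Given a partial key, return the shortest key in values that contains
--     that text."""
--     if partial_key in values:
--         return partial_key
--     best_key = None
--     for key in values:
--         if (partial_key in key and
--             (best_key is None or len(best_key) > len(key))):
--             best_key = key
--     return best_key
-- ===== SOURCE B (Python) =====
-- def PartialKeyFind(values, partial_key):
--     """Given a partial key, return the shortest key in values that contains
--     that text."""
--     for key in sorted(values, key=len):
--         if partial_key in key:
--             return key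
--     return None
-- ===== Notes on version B (the rewrite author's own statement) =====
-- stated objective: alternative
-- what changed: Replaces the fused exact-match shortcut plus running-minimum loop with a stable sort of the keys by length followed by a first-match scan; the stable sort reproduces A's first-seen tie-breaking and the exact-match case falls out because partial_key is the unique shortest key containing itself.
import Mathlib
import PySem

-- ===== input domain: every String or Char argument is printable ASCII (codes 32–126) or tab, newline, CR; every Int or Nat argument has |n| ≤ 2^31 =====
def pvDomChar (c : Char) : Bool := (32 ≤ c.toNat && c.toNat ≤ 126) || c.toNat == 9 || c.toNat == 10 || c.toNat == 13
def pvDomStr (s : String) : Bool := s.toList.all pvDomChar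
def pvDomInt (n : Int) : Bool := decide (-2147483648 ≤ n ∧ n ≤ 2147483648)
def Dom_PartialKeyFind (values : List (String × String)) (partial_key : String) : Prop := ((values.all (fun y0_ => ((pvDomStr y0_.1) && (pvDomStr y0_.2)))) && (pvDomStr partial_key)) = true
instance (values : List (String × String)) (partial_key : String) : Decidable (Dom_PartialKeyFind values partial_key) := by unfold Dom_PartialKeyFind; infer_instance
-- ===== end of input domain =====

-- B replaces A's fused running-minimum loop by a stable length-sort of the keys followed by a
-- first-match scan (objective: alternative algorithm, same results, not faster).

-- ===== PORT A =====
-- body of A's 'for key in values' loop (the fold function of the running-minimum pass)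
def pvStepA (partial_key : String) (best : Option String) (key : String) : Option String :=
  if PySem.Str.isIn partial_key key &&
      (match best with
       | none => true
       | some b => decide (PySem.Str.len b > PySem.Str.len key)) then
    some key
  else best

def PartialKeyFind (values : List (String × String)) (partial_key : String) : Option String :=
  if values.any (fun kv => kv.1 == partial_key) then some partial_key
  else values.foldl (fun best kv => pvStepA partial_key best kv.1) none

-- ===== PORT B =====
def PartialKeyFind_alt (values : List (String × String)) (partial_key : String) : Option String :=
  (PySem.List.sorted (values.map Prod.fst) PySem.Str.len).find?
    (fun key => PySem.Str.isIn partial_key key)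

-- ===== PRECONDITION & SPEC =====
def Spec_PartialKeyFind (values : List (String × String)) (partial_key : String) (out : Option String) : Prop := out = PartialKeyFind_alt values partial_key
instance (values : List (String × String)) (partial_key : String) (out : Option String) : Decidable (Spec_PartialKeyFind values partial_key out) := by unfold Spec_PartialKeyFind; infer_instance

-- ===== CLAIM (what is proved, stated in full; the proofs are below) =====
def Claim_equal_PartialKeyFind : Prop := ∀ (values : List (String × String)) (partial_key : String), Dom_PartialKeyFind values partial_key → Spec_PartialKeyFind values partial_key (PartialKeyFind values partial_key)

-- ===== LEMMAS AND PROOFS =====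

-- substring facts specific to the predicate both programs test
theorem pv_eq_of_isIn_of_len_le {pk k : String} (h : PySem.Str.isIn pk k = true)
    (hl : PySem.Str.len k ≤ PySem.Str.len pk) : k = pk := by
  have hs := ((PySem.Str.isIn_iff_infix pk k).mp h).sublist
  rw [PySem.Str.len_eq, PySem.Str.len_eq] at hl
  have hlen : k.toList.length ≤ pk.toList.length := by exact_mod_cast hl
  have ht : pk.toList = k.toList := hs.eq_of_length (le_antisymm hs.length_le hlen)
  have := congrArg String.ofList ht
  simpa using this.symm

-- helper equations for A's loop step
theorem pvStepA_none (pk x : String) :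
    pvStepA pk none x = if PySem.Str.isIn pk x = true then some x else none := by
  unfold pvStepA; cases PySem.Str.isIn pk x <;> rfl

theorem pvStepA_some (pk x b : String) :
    pvStepA pk (some b) x
      = if (PySem.Str.isIn pk x && decide (PySem.Str.len b > PySem.Str.len x)) = true then
          some x
        else some b := rfl

-- inserting x into a length-sorted list and taking the first match is exactly A's loop step
theorem pv_find?_insertBy (pk x : String) (s : List String)
    (hs : s.Pairwise (fun a b => PySem.Str.len a ≤ PySem.Str.len b)) :
    (PySem.List.insertBy (fun a b => decide (PySem.Str.len a < PySem.Str.len b)) x s).find?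
        (fun k => PySem.Str.isIn pk k)
      = pvStepA pk (s.find? (fun k => PySem.Str.isIn pk k)) x := by
  induction s with
  | nil =>
      rw [show PySem.List.insertBy (fun a b => decide (PySem.Str.len a < PySem.Str.len b)) x [] = [x] from rfl,
        List.find?_nil, pvStepA_none]
      by_cases hpx : PySem.Str.isIn pk x = true
      · rw [List.find?_cons_of_pos hpx, if_pos hpx]
      · rw [List.find?_cons_of_neg hpx, if_neg hpx, List.find?_nil]
  | cons y ys ih =>
      rcases List.pairwise_cons.mp hs with ⟨hy, hys⟩
      by_cases hxy : PySem.Str.len x < PySem.Str.len y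
      · simp only [PySem.List.insertBy, hxy, decide_true, if_true]
        cases hfy : (y :: ys).find? (fun k => PySem.Str.isIn pk k) with
        | none =>
            rw [pvStepA_none]
            by_cases hpx : PySem.Str.isIn pk x = true
            · rw [List.find?_cons_of_pos hpx, if_pos hpx]
            · rw [List.find?_cons_of_neg hpx, if_neg hpx]
              exact hfy
        | some m =>
            have hm : m ∈ y :: ys := List.mem_of_find?_eq_some hfy
            have hxm : PySem.Str.len x < PySem.Str.len m := by
              rcases List.mem_cons.mp hm with rfl | hm'
              · exact hxy
              · exact lt_of_lt_of_le hxy (hy m hm')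
            have hd : decide (PySem.Str.len m > PySem.Str.len x) = true := decide_eq_true hxm
            rw [pvStepA_some]
            by_cases hpx : PySem.Str.isIn pk x = true
            · rw [List.find?_cons_of_pos hpx, if_pos (by rw [hpx, hd]; exact rfl)]
            · have hcond : (PySem.Str.isIn pk x && decide (PySem.Str.len m > PySem.Str.len x)) = false := by
                have hpx' : PySem.Str.isIn pk x = false := by
                  cases h' : PySem.Str.isIn pk x
                  · rfl
                  · exact absurd h' hpx
                rw [hpx', Bool.false_and]
              rw [List.find?_cons_of_neg hpx,
                if_neg (fun hc => Bool.false_ne_true (hcond.symm.trans hc))]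
              exact hfy
      · have hd : decide (PySem.Str.len x < PySem.Str.len y) = false := decide_eq_false hxy
        simp only [PySem.List.insertBy, hd, Bool.false_eq_true, if_false]
        by_cases hpy : PySem.Str.isIn pk y = true
        · have hd2 : decide (PySem.Str.len y > PySem.Str.len x) = false := decide_eq_false hxy
          have hcond : (PySem.Str.isIn pk x && decide (PySem.Str.len y > PySem.Str.len x)) = false := by
            rw [hd2, Bool.and_false]
          rw [List.find?_cons_of_pos hpy, List.find?_cons_of_pos hpy, pvStepA_some,
            if_neg (fun hc => Bool.false_ne_true (hcond.symm.trans hc))]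
        · rw [List.find?_cons_of_neg hpy, ih hys, List.find?_cons_of_neg hpy]

-- A's fold over the keys equals B's first-match scan of the length-sorted keys
theorem pv_fold_eq_find (pk : String) (l : List String) :
    l.foldl (pvStepA pk) none
      = (PySem.List.sorted l PySem.Str.len).find? (fun k => PySem.Str.isIn pk k) := by
  induction l using List.reverseRecOn with
  | nil => simp [PySem.List.sorted_eq_foldl_insertBy]
  | append_singleton l x ih =>
      rw [List.foldl_append, List.foldl_cons, List.foldl_nil,
        PySem.List.sorted_eq_foldl_insertBy, List.foldl_append, List.foldl_cons, List.foldl_nil,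
        ← PySem.List.sorted_eq_foldl_insertBy,
        pv_find?_insertBy pk x _ (PySem.List.sorted_pairwise l PySem.Str.len), ih]

-- if pk itself is a key, the first match of the length-sorted keys is pk
theorem pv_find_sorted_self (pk : String) (l : List String) (h : pk ∈ l) :
    (PySem.List.sorted l PySem.Str.len).find? (fun k => PySem.Str.isIn pk k) = some pk := by
  have hpk : PySem.Str.isIn pk pk = true := (PySem.Str.isIn_iff_infix pk pk).mpr (List.infix_refl _)
  have hmem : pk ∈ PySem.List.sorted l PySem.Str.len :=
    (PySem.List.mem_sorted _ _ _ _).mpr h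
  cases hf : (PySem.List.sorted l PySem.Str.len).find? (fun k => PySem.Str.isIn pk k) with
  | none =>
      exact absurd hpk (by simpa using (List.find?_eq_none.mp hf pk hmem))
  | some m =>
      rcases List.find?_eq_some_iff_append.mp hf with ⟨hpm, as, bs, hsplit, hpre⟩
      have hpm' : PySem.Str.isIn pk m = true := by simpa using hpm
      have hppk : pk = m ∨ pk ∈ bs := by
        rw [hsplit] at hmem
        rcases List.mem_append.mp hmem with hin | hin
        · exact absurd hpk (by simpa using hpre pk hin)
        · rcases List.mem_cons.mp hin with h' | h'
          · exact Or.inl h'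
          · exact Or.inr h'
      rcases hppk with rfl | hin
      · rfl
      · have hpair := PySem.List.sorted_pairwise l PySem.Str.len
        rw [hsplit] at hpair
        have hmle : PySem.Str.len m ≤ PySem.Str.len pk := by
          have := (List.pairwise_append.mp hpair).2.1
          exact (List.pairwise_cons.mp this).1 pk hin
        rw [pv_eq_of_isIn_of_len_le hpm' hmle]

-- ===== VERDICT (by name: the statement is the Claim_ definition above) =====
theorem PartialKeyFind_spec : Claim_equal_PartialKeyFind := by
  intro values pk _
  unfold Spec_PartialKeyFind PartialKeyFind PartialKeyFind_alt
  by_cases h : values.any (fun kv => kv.1 == pk) = true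
  · have hmem : pk ∈ values.map Prod.fst := by
      rcases List.any_eq_true.mp h with ⟨kv, hkv, he⟩
      exact List.mem_map.mpr ⟨kv, hkv, by simpa using he⟩
    rw [if_pos h]
    exact (pv_find_sorted_self pk _ hmem).symm
  · rw [if_neg h, ← List.foldl_map, pv_fold_eq_find]
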